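-- pv_equiv track=rewrite | github.com/durvaakadam/SLPRACS | sl2decrypt.py | prepare_digraphs
-- ===== SOURCE A (Python) =====
-- def prepare_digraphs(text):
--     digraphs = []
--     i = 0
--     while i < len(text):
--         if i + 1 < len(text):
--             digraphs.append(text[i:i + 2])
--             i += 2
--         else:
--             digraphs.append(text[i] + 'X')
--             i += 1
--     return digraphs
-- ===== SOURCE B (Python) =====
-- def prepare_digraphs(text):
--     digraphs = []
--     carry = None
--     for ch in text:
--         if carry is None:
--             carry = ch
--         else:
--             digraphs.append(carry + ch)
--             carry = None
--     if carry is not None: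
--         digraphs.append(carry + 'X')
--     return digraphs
-- ===== Notes on version B (the rewrite author's own statement) =====
-- stated objective: alternative
-- what changed: B streams over the characters once with a pending-carry accumulator (emit a pair when a carry is held, flush the leftover carry with 'X' at the end), instead of A's index-based while-loop that slices text[i:i+2] and branches per step on whether a second character remains.
import Mathlib
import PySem

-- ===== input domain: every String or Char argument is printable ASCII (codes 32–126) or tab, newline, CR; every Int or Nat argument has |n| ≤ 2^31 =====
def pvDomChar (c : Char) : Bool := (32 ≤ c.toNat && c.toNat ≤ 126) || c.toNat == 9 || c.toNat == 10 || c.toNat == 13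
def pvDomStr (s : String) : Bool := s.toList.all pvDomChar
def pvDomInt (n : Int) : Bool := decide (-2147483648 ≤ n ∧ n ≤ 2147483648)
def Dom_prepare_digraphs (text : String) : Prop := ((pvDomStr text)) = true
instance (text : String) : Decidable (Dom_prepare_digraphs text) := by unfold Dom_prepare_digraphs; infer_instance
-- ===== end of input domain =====

-- B replaces A's index-walk with slicing by a single streaming fold over the characters with a pending-carry accumulator; same O(n) cost.

-- ===== PORT A =====
-- A's while-loop: index i, an accumulating list, branch between a 2-slice and text[i] + 'X'.
-- text[i] is always in range in the else branch (i < len), so pyGetD with a dummy default is exact there.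
def prepareDigraphsLoop (t : List Char) (digraphs : List String) (i : Nat) : List String :=
  if i < t.length then
    if i + 1 < t.length then
      prepareDigraphsLoop t (digraphs ++ [String.ofList (PySem.List.slice t (some (i : Int)) (some ((i : Int) + 2)))]) (i + 2)
    else
      prepareDigraphsLoop t (digraphs ++ [String.ofList [PySem.List.pyGetD t (i : Int) ' ', 'X']]) (i + 1)
  else digraphs
termination_by t.length - i

def prepare_digraphs (text : String) : List String :=
  prepareDigraphsLoop text.toList [] 0

-- ===== PORT B =====
-- B's for-loop body: carry = None → hold the char; carry = Some c → emit the pair, clear the carry.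
def digraphStep (st : List String × Option Char) (ch : Char) : List String × Option Char :=
  match st.2 with
  | none => (st.1, some ch)
  | some c => (st.1 ++ [String.ofList [c, ch]], none)

def prepare_digraphs_alt (text : String) : List String :=
  let st := text.toList.foldl digraphStep ([], none)
  match st.2 with
  | none => st.1
  | some c => st.1 ++ [String.ofList [c, 'X']]

-- ===== PRECONDITION & SPEC =====
def Spec_prepare_digraphs (text : String) (out : List String) : Prop := out = prepare_digraphs_alt text
instance (text : String) (out : List String) : Decidable (Spec_prepare_digraphs text out) := by unfold Spec_prepare_digraphs; infer_instance

-- ===== CLAIM (what is proved, stated in full; the proofs are below) =====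
def Claim_equal_prepare_digraphs : Prop := ∀ (text : String), Dom_prepare_digraphs text → Spec_prepare_digraphs text (prepare_digraphs text)

-- ===== LEMMAS AND PROOFS =====

-- canonical pairing of a char list, padding a trailing singleton
def pairsOf : List Char → List String
  | [] => []
  | [c] => [String.ofList [c, 'X']]
  | a :: b :: r => String.ofList [a, b] :: pairsOf r

-- A's loop produces the canonical pairing of the remaining suffix
lemma loop_eq (t : List Char) : ∀ (i : Nat) (acc : List String),
    prepareDigraphsLoop t acc i = acc ++ pairsOf (t.drop i) := by
  intro i
  induction hn : t.length - i using Nat.strong_induction_on generalizing i with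
  | _ n ih =>
    intro acc
    rw [prepareDigraphsLoop]
    by_cases h : i < t.length
    · rw [if_pos h]
      by_cases h2 : i + 1 < t.length
      · rw [if_pos h2, ih (t.length - (i + 2)) (by omega) (i + 2) rfl]
        have hsl : PySem.List.slice t (some (i : Int)) (some ((i : Int) + 2)) = (t.drop i).take 2 := by
          have h2' : ((i : Int) + 2) = ((i : Int) + ((2 : Nat) : Int)) := by norm_num
          rw [h2', PySem.List.slice_natCast_add]
        have hd2 : t.drop i = t[i]'(by omega) :: t[i+1]'(by omega) :: t.drop (i + 2) := by
          rw [List.drop_eq_getElem_cons (by omega : i < t.length),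
              List.drop_eq_getElem_cons (by omega : i + 1 < t.length)]
        rw [hsl, hd2]
        have ht2 : List.take 2 (t[i]'(by omega) :: t[i+1]'(by omega) :: t.drop (i + 2)) = [t[i]'(by omega), t[i+1]'(by omega)] := rfl
        rw [ht2, pairsOf]
        simp only [List.append_assoc, List.singleton_append]
      · rw [if_neg h2, ih (t.length - (i + 1)) (by omega) (i + 1) rfl]
        have hg : PySem.List.pyGetD t (i : Int) ' ' = t[i]'(by omega) := by
          rw [PySem.List.pyGetD_eq_getElem] <;> simp [h]
        rw [hg, List.drop_eq_getElem_cons (by omega : i < t.length)]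
        have hnil : t.drop (i + 1) = [] := by simp [List.drop_eq_nil_iff]; omega
        simp [hnil, pairsOf]
    · rw [if_neg h]
      have hnil : t.drop i = [] := by simp [List.drop_eq_nil_iff]; omega
      simp [hnil, pairsOf]

-- B's carry fold, started with no carry, produces the same canonical pairing
lemma fold_eq : ∀ (t : List Char) (acc : List String),
    (match (t.foldl digraphStep (acc, none)).2 with
     | none => (t.foldl digraphStep (acc, none)).1
     | some c => (t.foldl digraphStep (acc, none)).1 ++ [String.ofList [c, 'X']])
    = acc ++ pairsOf t := by
  intro t
  induction t using pairsOf.induct with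
  | case1 => intro acc; simp [pairsOf]
  | case2 c => intro acc; simp [pairsOf, digraphStep]
  | case3 a b r ih =>
      intro acc
      have hstep : ((a :: b :: r).foldl digraphStep (acc, none))
          = r.foldl digraphStep (acc ++ [String.ofList [a, b]], none) := by
        simp [List.foldl, digraphStep]
      rw [hstep, ih, pairsOf]
      simp

-- ===== VERDICT (by name: the statement is the Claim_ definition above) =====
theorem prepare_digraphs_spec : Claim_equal_prepare_digraphs := by
  intro text _
  unfold Spec_prepare_digraphs prepare_digraphs prepare_digraphs_alt
  rw [loop_eq]
  have := fold_eq text.toList []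
  simp only [List.nil_append, List.drop_zero] at *
  exact this.symm
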